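-- pv_equiv track=rewrite | github.com/stone0090/zq-trade | core/analyzer/squeeze.py | _count_relaxed
-- ===== SOURCE A (Python) =====
-- def _count_relaxed(ranges, small_threshold, large_threshold, tail_idx):
--     """宽松模式：用振幅(range)计数所有非大K线，验证小K线占比≥40%。"""
--     count = 0
--     small_count = 0
--     seq_end = tail_idx
--
--     i = tail_idx
--     while i >= 0:
--         r = ranges[i]
--         if r == 0:  # 数据异常，中断
--             break
--         if r < large_threshold:
--             count += 1
--             if r < small_threshold:
--                 small_count += 1
--         else:
--             break
--         i -= 1
--
--     seq_start = i + 1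
--     if count == 0:
--         return None
--
--     # 小K线占比须≥40%
--     if small_count / count < 0.40:
--         return None
--
--     slightly_large_count = count - small_count
--     return (count, seq_start, seq_end, slightly_large_count)
-- ===== SOURCE B (Python) =====
-- def _count_relaxed(ranges, small_threshold, large_threshold, tail_idx):
--     """宽松模式：用振幅(range)计数所有非大K线，验证小K线占比≥40%。"""
--     # Forward streaming pass: track the start of the current qualifying run
--     # and the number of small K-lines inside it, resetting at every breaker.
--     seq_start = 0
--     small_count = 0
--     for j in range(tail_idx + 1):
--         r = ranges[j]
--         if r == 0 or r >= large_threshold: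
--             seq_start = j + 1
--             small_count = 0
--         elif r < small_threshold:
--             small_count += 1
--     count = tail_idx - seq_start + 1  # closed-form run length
--     if count <= 0:
--         return None
--     # exact integer form of small_count / count < 0.40
--     if 5 * small_count < 2 * count:
--         return None
--     return (count, seq_start, tail_idx, count - small_count)
-- ===== Notes on version B (the rewrite author's own statement) =====
-- stated objective: alternative
-- what changed: B replaces A's backward while-loop from tail_idx by a single forward streaming pass over indices 0..tail_idx that tracks the start of the current qualifying run and its small-K count (resetting at every breaker), derives count as the closed-form run length, and replaces the float ratio test small/count<0.40 by the exact integer test 5*small<2*count.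
import Mathlib
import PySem

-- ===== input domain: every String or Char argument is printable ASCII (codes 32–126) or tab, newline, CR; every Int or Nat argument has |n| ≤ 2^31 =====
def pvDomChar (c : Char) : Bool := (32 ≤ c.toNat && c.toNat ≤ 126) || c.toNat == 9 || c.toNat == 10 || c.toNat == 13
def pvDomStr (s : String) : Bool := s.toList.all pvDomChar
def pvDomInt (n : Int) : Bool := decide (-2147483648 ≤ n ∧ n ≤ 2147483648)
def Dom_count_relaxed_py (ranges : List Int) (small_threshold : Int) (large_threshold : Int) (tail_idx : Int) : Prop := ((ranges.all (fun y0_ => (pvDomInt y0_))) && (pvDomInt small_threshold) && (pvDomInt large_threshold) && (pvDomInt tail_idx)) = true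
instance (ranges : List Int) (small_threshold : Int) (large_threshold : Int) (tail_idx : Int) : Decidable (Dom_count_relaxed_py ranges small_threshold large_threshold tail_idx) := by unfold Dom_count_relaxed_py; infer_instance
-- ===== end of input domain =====

-- B replaces A's backward while-loop by a single forward streaming pass over 0..tail_idx
-- tracking the current qualifying run, with a closed-form count and an exact integer ratio test.


-- ===== PORT A =====
-- A's while loop: state (count, small_count, i); pyGetD totalizes the in-range access
-- (Pre_ guarantees every visited index is in range).
def loopA (ranges : List Int) (small_threshold large_threshold : Int)
    (count small_count i : Int) : Int × Int × Int :=
  if 0 ≤ i then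
    let r := PySem.List.pyGetD ranges i 0
    if r = 0 then (count, small_count, i)
    else if r < large_threshold then
      loopA ranges small_threshold large_threshold (count + 1)
        (if r < small_threshold then small_count + 1 else small_count) (i - 1)
    else (count, small_count, i)
  else (count, small_count, i)
termination_by (i + 1).toNat
decreasing_by omega

def count_relaxed_py (ranges : List Int) (small_threshold : Int) (large_threshold : Int) (tail_idx : Int) : Option (Int × Int × Int × Int) :=
  let seq_end := tail_idx
  let res := loopA ranges small_threshold large_threshold 0 0 tail_idx
  let count := res.1
  let small_count := res.2.1
  let seq_start := res.2.2 + 1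
  if count = 0 then none
  -- float test 'small_count / count < 0.40': exact as the rational test 5*small < 2*count,
  -- since for these magnitudes no ratio p/q other than those on 2/5's side of it rounds across the double 0.40
  else if 5 * small_count < 2 * count then none
  else some (count, seq_start, seq_end, count - small_count)

-- ===== PORT B =====
-- one step of B's forward for-loop: state (seq_start, small_count)
def stepF (ranges : List Int) (small_threshold large_threshold : Int)
    (acc : Int × Int) (j : Int) : Int × Int :=
  let r := PySem.List.pyGetD ranges j 0
  if r = 0 ∨ large_threshold ≤ r then (j + 1, 0)
  else if r < small_threshold then (acc.1, acc.2 + 1)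
  else acc

def count_relaxed_py_alt (ranges : List Int) (small_threshold : Int) (large_threshold : Int) (tail_idx : Int) : Option (Int × Int × Int × Int) :=
  let acc := (PySem.List.pyRange 0 (tail_idx + 1) 1).foldl (stepF ranges small_threshold large_threshold) (0, 0)
  let seq_start := acc.1
  let count := tail_idx - seq_start + 1
  if count ≤ 0 then none
  else if 5 * acc.2 < 2 * count then none
  else some (count, seq_start, tail_idx, count - acc.2)

-- ===== PRECONDITION & SPEC =====
-- A raises IndexError iff 0 ≤ tail_idx and tail_idx ≥ len(ranges); excluded here.
def Pre_count_relaxed_py (ranges : List Int) (small_threshold : Int) (large_threshold : Int) (tail_idx : Int) : Prop := tail_idx < ranges.length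
instance (ranges : List Int) (small_threshold : Int) (large_threshold : Int) (tail_idx : Int) : Decidable (Pre_count_relaxed_py ranges small_threshold large_threshold tail_idx) := by unfold Pre_count_relaxed_py; infer_instance

def pvWitness_count_relaxed_py : List Int × Int × Int × Int := ([1, 2, 1], 2, 3, 2)

def Spec_count_relaxed_py (ranges : List Int) (small_threshold : Int) (large_threshold : Int) (tail_idx : Int) (out : Option (Int × Int × Int × Int)) : Prop := out = count_relaxed_py_alt ranges small_threshold large_threshold tail_idx
instance (ranges : List Int) (small_threshold : Int) (large_threshold : Int) (tail_idx : Int) (out : Option (Int × Int × Int × Int)) : Decidable (Spec_count_relaxed_py ranges small_threshold large_threshold tail_idx out) := by unfold Spec_count_relaxed_py; infer_instance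

-- ===== CLAIM =====
def Claim_equal_count_relaxed_py : Prop := ∀ (ranges : List Int) (small_threshold : Int) (large_threshold : Int) (tail_idx : Int), Dom_count_relaxed_py ranges small_threshold large_threshold tail_idx → Pre_count_relaxed_py ranges small_threshold large_threshold tail_idx → Spec_count_relaxed_py ranges small_threshold large_threshold tail_idx (count_relaxed_py ranges small_threshold large_threshold tail_idx)

-- ===== LEMMAS AND PROOFS =====

-- B's accumulator after the first i iterations
def accB (ranges : List Int) (small_threshold large_threshold i : Int) : Int × Int :=
  (PySem.List.pyRange 0 i 1).foldl (stepF ranges small_threshold large_threshold) (0, 0)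

theorem accB_succ (ranges : List Int) (st lt : Int) (n : Nat) :
    accB ranges st lt ((n : Int) + 1) =
      stepF ranges st lt (accB ranges st lt n) n := by
  unfold accB
  rw [PySem.List.pyRange_one_succ_right (by omega : (0:Int) ≤ n), List.foldl_append]
  rfl

theorem accB_bounds (ranges : List Int) (st lt : Int) :
    ∀ (n : Nat), 0 ≤ (accB ranges st lt n).1 ∧ (accB ranges st lt n).1 ≤ (n : Int) := by
  intro n
  induction n with
  | zero => simp [accB, PySem.List.pyRange]
  | succ m ih =>
    have h : ((m : Int) + 1) = ((m + 1 : Nat) : Int) := by push_cast; ring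
    rw [← h, accB_succ]
    simp only [stepF]
    split_ifs <;> (try dsimp only) <;> refine ⟨?_, ?_⟩ <;> omega

-- The invariant: A's backward loop from i is determined by B's forward accumulator at i+1.
theorem loopA_eq_accB (ranges : List Int) (st lt : Int) :
    ∀ (n : Nat) (c s : Int), (n : Int) < ranges.length →
      loopA ranges st lt c s n =
        (c + ((n : Int) + 1 - (accB ranges st lt ((n : Int) + 1)).1),
         s + (accB ranges st lt ((n : Int) + 1)).2,
         (accB ranges st lt ((n : Int) + 1)).1 - 1) := by
  intro n
  induction n with
  | zero =>
    intro c s hlen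
    rw [accB_succ]
    rw [loopA]
    have h0 : (0:Nat) = ((0:Nat):Int) := rfl
    simp only [stepF]
    simp only [Nat.cast_zero]
    have hacc : accB ranges st lt 0 = (0, 0) := by simp [accB, PySem.List.pyRange]
    rw [hacc]
    set r := PySem.List.pyGetD ranges 0 0 with hr
    by_cases h1 : r = 0
    · simp [h1]
    · by_cases h2 : r < lt
      · have hno : ¬ (r = 0 ∨ lt ≤ r) := by push Not; exact ⟨h1, by omega⟩
        rw [if_pos (by omega : (0:Int) ≤ 0), if_neg h1, if_pos h2]
        rw [loopA]
        rw [if_neg (by omega : ¬ (0:Int) ≤ 0 - 1)]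
        rw [if_neg hno]
        by_cases h3 : r < st <;> simp [h3]
      · have hyes : (r = 0 ∨ lt ≤ r) := Or.inr (by omega)
        rw [if_pos (by omega : (0:Int) ≤ 0), if_neg h1, if_neg h2, if_pos hyes]
        simp
  | succ m ih =>
    intro c s hlen
    have hcast : ((m + 1 : Nat) : Int) = (m : Int) + 1 := by push_cast; ring
    rw [hcast]
    have hstep : accB ranges st lt ((m : Int) + 1 + 1) =
        stepF ranges st lt (accB ranges st lt ((m : Int) + 1)) ((m : Int) + 1) := by
      have h' : ((m : Int) + 1) = ((m + 1 : Nat) : Int) := by push_cast; ring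
      rw [h', accB_succ]
    rw [hstep]
    rw [loopA]
    simp only [stepF]
    set r := PySem.List.pyGetD ranges ((m : Int) + 1) 0 with hr
    by_cases h1 : r = 0
    · simp [h1]
    · by_cases h2 : r < lt
      · have hno : ¬ (r = 0 ∨ lt ≤ r) := by push Not; exact ⟨h1, by omega⟩
        rw [if_pos (by omega : (0:Int) ≤ (m:Int) + 1), if_neg h1, if_pos h2]
        rw [if_neg hno]
        have hm : (m : Int) + 1 - 1 = (m : Int) := by ring
        rw [hm]
        rw [ih _ _ (by push_cast at hlen ⊢; omega)]
        by_cases h3 : r < st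
        · rw [if_pos h3, if_pos h3]
          exact Prod.ext (by ring) (Prod.ext (by ring) rfl)
        · rw [if_neg h3, if_neg h3]
          exact Prod.ext (by ring) (Prod.ext (by ring) rfl)
      · have hyes : (r = 0 ∨ lt ≤ r) := Or.inr (by omega)
        rw [if_pos (by omega : (0:Int) ≤ (m:Int) + 1), if_neg h1, if_neg h2, if_pos hyes]
        simp

-- ===== VERDICT =====
theorem count_relaxed_py_spec : Claim_equal_count_relaxed_py := by
  intro ranges st lt ti _ hpre
  unfold Spec_count_relaxed_py count_relaxed_py count_relaxed_py_alt
  by_cases hneg : ti < 0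
  · have hA : loopA ranges st lt 0 0 ti = (0, 0, ti) := by
      rw [loopA, if_neg (show ¬ (0:Int) ≤ ti by omega)]
    have hnil : PySem.List.pyRange 0 (ti + 1) 1 = [] :=
      PySem.List.pyRange_one_eq_nil (by omega)
    simp [hA, hnil]
  · obtain ⟨n, hn⟩ : ∃ n : Nat, ti = (n : Int) := ⟨ti.toNat, by omega⟩
    subst hn
    have hlen : (n : Int) < ranges.length := hpre
    have hacc : (PySem.List.pyRange 0 ((n:Int) + 1) 1).foldl (stepF ranges st lt) (0, 0)
        = accB ranges st lt ((n:Int) + 1) := rfl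
    rw [loopA_eq_accB ranges st lt n 0 0 hlen, hacc]
    have hb := accB_bounds ranges st lt (n + 1)
    rw [show ((n + 1 : Nat) : Int) = (n:Int) + 1 by push_cast; ring] at hb
    set X := (accB ranges st lt ((n : Int) + 1)).1 with hX
    set Y := (accB ranges st lt ((n : Int) + 1)).2 with hY
    dsimp only
    split_ifs <;> try rfl
    all_goals try (exfalso; omega)
    simp only [zero_add]
    exact congrArg some (Prod.ext (by ring) (Prod.ext (by ring) (Prod.ext rfl (by ring))))
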